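-- pv_equiv track=rewrite | github.com/abey79/aoc | aoc2020/day24.py | calc_coords
-- ===== SOURCE A (Python) =====
-- from typing import Dict, Tuple
--
-- COORD_TO_TUPLE = {
--     "e": (1, 0),
--     "w": (-1, 0),
--     "A": (0, 1),
--     "B": (-1, 1),
--     "C": (0, -1),
--     "D": (1, -1),
-- }
--
-- def calc_coords(path: str) -> Tuple[int, int]:
--     # e, se, sw, w, nw, ne
--     # e, A,  B,  w, C,  D
--
--     path = path.replace("se", "A").replace("sw", "B").replace("nw", "C").replace("ne", "D")
--
--     x, y = 0, 0
--     for c in path: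
--         offset = COORD_TO_TUPLE[c]
--         x += offset[0]
--         y += offset[1]
--
--     return x, y
-- ===== SOURCE B (Python) =====
-- from collections import Counter
--
-- COORD_TO_TUPLE = {
--     "e": (1, 0),
--     "w": (-1, 0),
--     "A": (0, 1),
--     "B": (-1, 1),
--     "C": (0, -1),
--     "D": (1, -1),
-- }
--
-- def calc_coords(path: str):
--     # Same normalization as A; then one Counter pass and a weighted sum
--     # (count * offset) over the distinct tokens instead of one offset-add per
--     # character. Unknown tokens still raise KeyError via the table lookup.
--     path = path.replace("se", "A").replace("sw", "B").replace("nw", "C").replace("ne", "D")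
--     x, y = 0, 0
--     for c, n in Counter(path).items():
--         dx, dy = COORD_TO_TUPLE[c]
--         x += n * dx
--         y += n * dy
--     return x, y
-- ===== Notes on version B (the rewrite author's own statement) =====
-- stated objective: alternative
-- what changed: A's per-character loop that adds one offset per character is replaced by a collections.Counter frequency table followed by a weighted sum (count times offset) over the distinct tokens.
import Mathlib
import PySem

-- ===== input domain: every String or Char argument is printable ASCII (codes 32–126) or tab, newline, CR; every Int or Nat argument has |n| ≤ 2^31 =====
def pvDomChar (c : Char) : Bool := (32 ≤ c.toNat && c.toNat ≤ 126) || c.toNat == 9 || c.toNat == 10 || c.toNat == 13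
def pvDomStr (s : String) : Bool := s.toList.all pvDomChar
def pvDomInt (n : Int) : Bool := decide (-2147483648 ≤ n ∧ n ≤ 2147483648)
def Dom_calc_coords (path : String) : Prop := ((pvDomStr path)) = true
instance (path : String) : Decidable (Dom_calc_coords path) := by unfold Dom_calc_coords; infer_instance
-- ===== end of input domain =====

-- B replaces A's per-character accumulation loop by a Counter frequency table followed by
-- a weighted sum (count * offset) over the distinct tokens (objective: alternative, same cost).

-- ===== PORT A =====
-- the shared normalization chain path.replace("se","A").replace("sw","B").replace("nw","C").replace("ne","D")
def pvNormalize (path : String) : String :=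
  PySem.Str.replace (PySem.Str.replace (PySem.Str.replace
    (PySem.Str.replace path "se" "A") "sw" "B") "nw" "C") "ne" "D"

def COORD_TO_TUPLE : PySem.Dict Char (Int × Int) :=
  PySem.Dict.ofList [('e', (1, 0)), ('w', (-1, 0)), ('A', (0, 1)),
                     ('B', (-1, 1)), ('C', (0, -1)), ('D', (1, -1))]

-- A's loop; none = KeyError (excluded by Pre_)
def pvCalcLoop : List Char → Int → Int → Option (Int × Int)
  | [], x, y => some (x, y)
  | c :: rest, x, y =>
    match COORD_TO_TUPLE.get? c with
    | none => none
    | some off => pvCalcLoop rest (x + off.1) (y + off.2)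

def calc_coords (path : String) : Int × Int :=
  (pvCalcLoop (pvNormalize path).toList 0 0).getD (0, 0)

-- ===== PORT B =====
-- Source B: normalize, build Counter(path), then fold the weighted sum over its items;
-- the Option accumulator is none once a lookup misses (KeyError, excluded by Pre_)
def calc_coords_alt (path : String) : Int × Int :=
  ((PySem.Dict.counter (pvNormalize path).toList).items.foldl
      (fun acc kv => acc.bind fun xy =>
        (COORD_TO_TUPLE.get? kv.1).map fun off =>
          (xy.1 + kv.2 * off.1, xy.2 + kv.2 * off.2))
      (some ((0 : Int), (0 : Int)))).getD (0, 0)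

-- ===== PRECONDITION & SPEC =====
-- Pre_ admits exactly the inputs on which Python A returns: after the replace chain every
-- character must be a key of COORD_TO_TUPLE, otherwise A raises KeyError.
def Pre_calc_coords (path : String) : Prop :=
  ((pvNormalize path).toList.all (fun c => c ∈ ['e', 'w', 'A', 'B', 'C', 'D'])) = true
instance (path : String) : Decidable (Pre_calc_coords path) := by
  unfold Pre_calc_coords; infer_instance

def pvWitness_calc_coords : String := "seswnwneew"

def Spec_calc_coords (path : String) (out : Int × Int) : Prop := out = calc_coords_alt path
instance (path : String) (out : Int × Int) : Decidable (Spec_calc_coords path out) := by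
  unfold Spec_calc_coords; infer_instance

-- ===== CLAIM =====
def Claim_equal_calc_coords : Prop :=
  ∀ (path : String), Dom_calc_coords path → Pre_calc_coords path →
    Spec_calc_coords path (calc_coords path)

-- ===== LEMMAS AND PROOFS =====

-- A's loop computes the weighted sums of the token counts
theorem pvCalcLoop_eq (l : List Char) :
    ∀ x y : Int, (∀ c ∈ l, c ∈ ['e', 'w', 'A', 'B', 'C', 'D']) →
      pvCalcLoop l x y =
        some (x + ((l.count 'e' : Int) - l.count 'w' - l.count 'B' + l.count 'D'),
              y + ((l.count 'A' : Int) + l.count 'B' - l.count 'C' - l.count 'D')) := by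
  induction l with
  | nil => intro x y _; simp [pvCalcLoop]
  | cons a t ih =>
    intro x y hall
    have ha : a ∈ ['e', 'w', 'A', 'B', 'C', 'D'] := hall a (by simp)
    have ht : ∀ c ∈ t, c ∈ ['e', 'w', 'A', 'B', 'C', 'D'] := fun c hc => hall c (by simp [hc])
    simp only [List.mem_cons, List.not_mem_nil, or_false] at ha
    rcases ha with h | h | h | h | h | h <;> subst h
    · show pvCalcLoop t (x + 1) (y + 0) = _
      rw [ih _ _ ht]; simp; omega
    · show pvCalcLoop t (x + (-1)) (y + 0) = _
      rw [ih _ _ ht]; simp; omega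
    · show pvCalcLoop t (x + 0) (y + 1) = _
      rw [ih _ _ ht]; simp; omega
    · show pvCalcLoop t (x + (-1)) (y + 1) = _
      rw [ih _ _ ht]; simp; omega
    · show pvCalcLoop t (x + 0) (y + (-1)) = _
      rw [ih _ _ ht]; simp; omega
    · show pvCalcLoop t (x + 1) (y + (-1)) = _
      rw [ih _ _ ht]; simp; omega

-- B's fold over any nodup list of known tokens, as an if-guarded weighted sum
theorem pvAltFold_eq (ks : List Char) (f : Char → Int) :
    ∀ x y : Int, ks.Nodup → (∀ k ∈ ks, k ∈ ['e', 'w', 'A', 'B', 'C', 'D']) →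
      (ks.map fun k => (k, f k)).foldl
          (fun acc kv => acc.bind fun xy =>
            (COORD_TO_TUPLE.get? kv.1).map fun off =>
              (xy.1 + kv.2 * off.1, xy.2 + kv.2 * off.2))
          (some (x, y)) =
        some (x + ((if 'e' ∈ ks then f 'e' else 0) - (if 'w' ∈ ks then f 'w' else 0)
                     - (if 'B' ∈ ks then f 'B' else 0) + (if 'D' ∈ ks then f 'D' else 0)),
              y + ((if 'A' ∈ ks then f 'A' else 0) + (if 'B' ∈ ks then f 'B' else 0)
                     - (if 'C' ∈ ks then f 'C' else 0) - (if 'D' ∈ ks then f 'D' else 0))) := by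
  induction ks with
  | nil => intro x y _ _; simp
  | cons a t ih =>
    intro x y hnd hall
    have ha : a ∈ ['e', 'w', 'A', 'B', 'C', 'D'] := hall a (by simp)
    have hat : a ∉ t := (List.nodup_cons.mp hnd).1
    have hndt : t.Nodup := (List.nodup_cons.mp hnd).2
    have ht : ∀ k ∈ t, k ∈ ['e', 'w', 'A', 'B', 'C', 'D'] := fun k hk => hall k (by simp [hk])
    simp only [List.mem_cons, List.not_mem_nil, or_false] at ha
    rcases ha with h | h | h | h | h | h <;> subst h
    · rw [List.map_cons, List.foldl_cons,
         show ((some ((x : Int), (y : Int))).bind fun xy =>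
            (COORD_TO_TUPLE.get? ('e', f 'e').1).map fun off =>
              (xy.1 + ('e', f 'e').2 * off.1, xy.2 + ('e', f 'e').2 * off.2))
            = some (x + f 'e' * 1, y + f 'e' * 0) from rfl,
         ih _ _ hndt ht]
      simp [List.mem_cons, hat]
      split_ifs <;> omega
    · rw [List.map_cons, List.foldl_cons,
         show ((some ((x : Int), (y : Int))).bind fun xy =>
            (COORD_TO_TUPLE.get? ('w', f 'w').1).map fun off =>
              (xy.1 + ('w', f 'w').2 * off.1, xy.2 + ('w', f 'w').2 * off.2))
            = some (x + f 'w' * (-1), y + f 'w' * 0) from rfl,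
         ih _ _ hndt ht]
      simp [List.mem_cons, hat]
      split_ifs <;> omega
    · rw [List.map_cons, List.foldl_cons,
         show ((some ((x : Int), (y : Int))).bind fun xy =>
            (COORD_TO_TUPLE.get? ('A', f 'A').1).map fun off =>
              (xy.1 + ('A', f 'A').2 * off.1, xy.2 + ('A', f 'A').2 * off.2))
            = some (x + f 'A' * 0, y + f 'A' * 1) from rfl,
         ih _ _ hndt ht]
      simp [List.mem_cons, hat]
      split_ifs <;> omega
    · rw [List.map_cons, List.foldl_cons,
         show ((some ((x : Int), (y : Int))).bind fun xy =>
            (COORD_TO_TUPLE.get? ('B', f 'B').1).map fun off =>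
              (xy.1 + ('B', f 'B').2 * off.1, xy.2 + ('B', f 'B').2 * off.2))
            = some (x + f 'B' * (-1), y + f 'B' * 1) from rfl,
         ih _ _ hndt ht]
      simp [List.mem_cons, hat]
      split_ifs <;> omega
    · rw [List.map_cons, List.foldl_cons,
         show ((some ((x : Int), (y : Int))).bind fun xy =>
            (COORD_TO_TUPLE.get? ('C', f 'C').1).map fun off =>
              (xy.1 + ('C', f 'C').2 * off.1, xy.2 + ('C', f 'C').2 * off.2))
            = some (x + f 'C' * 0, y + f 'C' * (-1)) from rfl,
         ih _ _ hndt ht]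
      simp [List.mem_cons, hat]
      split_ifs <;> omega
    · rw [List.map_cons, List.foldl_cons,
         show ((some ((x : Int), (y : Int))).bind fun xy =>
            (COORD_TO_TUPLE.get? ('D', f 'D').1).map fun off =>
              (xy.1 + ('D', f 'D').2 * off.1, xy.2 + ('D', f 'D').2 * off.2))
            = some (x + f 'D' * 1, y + f 'D' * (-1)) from rfl,
         ih _ _ hndt ht]
      simp [List.mem_cons, hat]
      split_ifs <;> omega

-- a token absent from the distinct-token list has count 0, so the if-guard drops
theorem pvIteCount (l : List Char) (c : Char) :
    (if c ∈ (PySem.Set.ofList l : List Char) then (l.count c : Int) else 0) = l.count c := by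
  by_cases h : c ∈ (PySem.Set.ofList l : List Char)
  · simp [h]
  · have hc : c ∉ l := fun hl => h ((PySem.Set.mem_ofList _ _).mpr hl)
    simp [h, List.count_eq_zero.mpr hc]

-- ===== VERDICT =====
theorem calc_coords_spec : Claim_equal_calc_coords := by
  intro path _ hpre
  unfold Spec_calc_coords calc_coords calc_coords_alt
  unfold Pre_calc_coords at hpre
  have hall : ∀ c ∈ (pvNormalize path).toList, c ∈ ['e', 'w', 'A', 'B', 'C', 'D'] := by
    intro c hc
    simpa using List.all_eq_true.mp hpre c hc
  rw [pvCalcLoop_eq _ 0 0 hall, PySem.Dict.items_counter,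
    pvAltFold_eq _ _ 0 0 (PySem.Set.nodup_ofList _)
      (fun k hk => hall k ((PySem.Set.mem_ofList _ _).mp hk))]
  simp only [Option.getD_some, pvIteCount, zero_add]
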